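-- pv_equiv track=rewrite | github.com/pc5401/my_BOJ | 백준/Silver/5426. 비밀 편지/비밀 편지.py | solve
-- ===== SOURCE A (Python) =====
-- def solve(N: int, W: str):
--     if N == 1:
--         return W
--
--     n = 1
--     for i in range(2, 101):
--         if i*i == N:
--             n = i
--
--     rtn = ''
--     for i in range(n-1, -1, -1):
--         for j in range(i, N, n):
--             rtn += W[j]
--
--     return rtn
-- ===== SOURCE B (Python) =====
-- def solve(N: int, W: str):
--     if N == 1:
--         return W
--
--     n = 1
--     for i in range(2, 101):
--         if i * i == N:
--             n = i
--
--     rows = [W[r * n:(r + 1) * n] for r in range(N // n)]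
--     return ''.join(''.join(col) for col in reversed(list(zip(*rows))))
-- ===== Notes on version B (the rewrite author's own statement) =====
-- stated objective: idiomatic
-- what changed: B replaces A's stride-indexed character arithmetic over the flat string (nested index loops with string +=) by building explicit row slices, transposing them with zip(*rows) and joining the reversed columns.
import Mathlib
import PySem

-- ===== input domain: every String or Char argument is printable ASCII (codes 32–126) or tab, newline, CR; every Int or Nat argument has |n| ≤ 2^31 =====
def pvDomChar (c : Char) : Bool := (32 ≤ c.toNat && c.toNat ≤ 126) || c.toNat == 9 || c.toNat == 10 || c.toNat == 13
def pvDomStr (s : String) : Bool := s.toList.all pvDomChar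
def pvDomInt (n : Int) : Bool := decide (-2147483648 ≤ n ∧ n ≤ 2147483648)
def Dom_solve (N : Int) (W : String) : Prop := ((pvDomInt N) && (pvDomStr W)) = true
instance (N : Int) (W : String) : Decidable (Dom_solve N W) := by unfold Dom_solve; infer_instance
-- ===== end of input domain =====

-- B rebuilds the output via explicit row slices, a truncating transpose (zip(*rows)) and a join over
-- the reversed columns, instead of A's stride-indexed nested loops over the flat string (idiomatic).

-- ===== PORT A =====
-- the default ' ' of pyGetD is never used on inputs admitted by Pre_solve
-- (there every accessed index j satisfies 0 ≤ j < N ≤ len W; outside Pre_solve Python raises IndexError)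
def solve (N : Int) (W : String) : String :=
  if N = 1 then W
  else
    let n := (PySem.List.pyRange 2 101 1).foldl (fun n i => if i * i = N then i else n) 1
    let rtn := (PySem.List.pyRange (n - 1) (-1) (-1)).foldl (fun rtn i =>
        (PySem.List.pyRange i N n).foldl (fun rtn j =>
          rtn ++ [PySem.List.pyGetD W.toList j ' ']) rtn) ([] : List Char)
    String.ofList rtn

-- ===== PORT B =====
-- zip(*rows): emit a row of heads at a time until some row is exhausted; the fuel is the length of
-- the first row, an upper bound on the number of emitted tuples (exact: when the fuel runs out the
-- first row is empty, so zip would stop there anyway)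
def pyZipAux : Nat → List (List Char) → List (List Char)
  | 0, _ => []
  | fuel + 1, rows =>
      if rows.any List.isEmpty then []
      else (rows.filterMap List.head?) :: pyZipAux fuel (rows.map List.tail)

def pyZip (rows : List (List Char)) : List (List Char) :=
  pyZipAux (rows.headD []).length rows

def solve_alt (N : Int) (W : String) : String :=
  if N = 1 then W
  else
    let n := (PySem.List.pyRange 2 101 1).foldl (fun n i => if i * i = N then i else n) 1
    let rows := (PySem.List.pyRange 0 (PySem.Int.floordiv N n) 1).map
        (fun r => PySem.List.slice W.toList (some (r * n)) (some ((r + 1) * n)))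
    String.ofList ((pyZip rows).reverse.flatten)

-- ===== PRECONDITION & SPEC =====
-- Pre_ excludes exactly the inputs on which A raises IndexError (W[j] with j past the end of W,
-- i.e. N ≥ 2 and N > len(W)); on every admitted input A returns normally.
def Pre_solve (N : Int) (W : String) : Prop := N = 1 ∨ N ≤ (W.toList.length : Int)
instance (N : Int) (W : String) : Decidable (Pre_solve N W) := by unfold Pre_solve; infer_instance
def pvWitness_solve : Int × String := (4, "abcd")

def Spec_solve (N : Int) (W : String) (out : String) : Prop := out = solve_alt N W
instance (N : Int) (W : String) (out : String) : Decidable (Spec_solve N W out) := by unfold Spec_solve; infer_instance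

-- ===== CLAIM (what is proved, stated in full; the proofs are below) =====
def Claim_equal_solve : Prop := ∀ (N : Int) (W : String), Dom_solve N W → Pre_solve N W → Spec_solve N W (solve N W)

-- ===== LEMMAS AND PROOFS =====

-- the n-search fold returns 1 or an element n of the scanned list with n * n = N
theorem foldsq (N : Int) (l : List Int) : ∀ (a : Int), (∀ x ∈ l, 2 ≤ x) → (a = 1 ∨ (2 ≤ a ∧ a * a = N)) →
    l.foldl (fun n i => if i * i = N then i else n) a = 1 ∨
    (2 ≤ l.foldl (fun n i => if i * i = N then i else n) a ∧
     (l.foldl (fun n i => if i * i = N then i else n) a) *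
       (l.foldl (fun n i => if i * i = N then i else n) a) = N) := by
  induction l with
  | nil => intro a _ ha; simpa using ha
  | cons x xs ih =>
    intro a hl ha
    simp only [List.foldl_cons]
    apply ih
    · intro y hy; exact hl y (List.mem_cons_of_mem _ hy)
    · by_cases hx : x * x = N
      · simp only [hx]
        exact Or.inr ⟨hl x (List.mem_cons_self), hx⟩
      · simpa [hx] using ha

theorem filterMap_head?_all_ne (rows : List (List Char)) (h : ∀ r ∈ rows, r ≠ []) :
    rows.filterMap List.head? = rows.map (fun r => r.getD 0 ' ') := by
  induction rows with
  | nil => rfl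
  | cons r rest ih =>
    match r, h r List.mem_cons_self with
    | (x :: xs), _ =>
      simp only [List.filterMap_cons, List.head?_cons, List.map_cons, List.getD_cons_zero]
      rw [ih (fun r hr => h r (List.mem_cons_of_mem _ hr))]

-- on rows all of the same length m, pyZip is the full m-column transpose
theorem pyZipAux_uniform (m : Nat) : ∀ (rows : List (List Char)), rows ≠ [] →
    (∀ r ∈ rows, r.length = m) →
    pyZipAux m rows = (List.range m).map (fun c => rows.map (fun r => r.getD c ' ')) := by
  induction m with
  | zero => intros; simp [pyZipAux]
  | succ m ih =>
    intro rows hne hlen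
    have hnil : ∀ r ∈ rows, r ≠ [] := by
      intro r hr h; have := hlen r hr; simp [h] at this
    have hany : rows.any List.isEmpty = false := by
      simp only [List.any_eq_false]
      intro r hr; simpa using hnil r hr
    rw [pyZipAux, hany]
    simp only [Bool.false_eq_true, if_false]
    rw [filterMap_head?_all_ne rows hnil]
    rw [ih (rows.map List.tail) (by simpa using hne)
        (by intro r hr
            obtain ⟨r0, hr0, rfl⟩ := List.mem_map.mp hr
            have := hlen r0 hr0
            simp [List.length_tail, this])]
    rw [List.range_succ_eq_map]
    simp only [List.map_cons, List.map_map]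
    congr 1
    apply List.map_congr_left
    intro c _
    apply List.map_congr_left
    intro r hr
    match r, hnil r hr with
    | (x :: xs), _ => simp

theorem pyZip_uniform (m : Nat) (rows : List (List Char)) (hne : rows ≠ [])
    (hlen : ∀ r ∈ rows, r.length = m) :
    pyZip rows = (List.range m).map (fun c => rows.map (fun r => r.getD c ' ')) := by
  obtain ⟨r0, rest, rfl⟩ := List.exists_cons_of_ne_nil hne
  have h0 : (pyZip (r0 :: rest)) = pyZipAux r0.length (r0 :: rest) := rfl
  rw [h0, hlen r0 List.mem_cons_self]
  exact pyZipAux_uniform m _ hne hlen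

theorem getD_take_drop (L : List Char) (j m c : Nat) (hc : c < m) (hle : j + m ≤ L.length) :
    ((L.drop j).take m).getD c ' ' = L.getD (j + c) ' ' := by
  have h1 : c < ((L.drop j).take m).length := by
    simp only [List.length_take, List.length_drop]; omega
  have h2 : j + c < L.length := by omega
  rw [List.getD_eq_getElem _ _ h1, List.getD_eq_getElem _ _ h2]
  rw [List.getElem_take, List.getElem_drop]

-- the character A reads at stride position (n-1-k) + n*r is the entry (r, n-1-k) of B's transpose
theorem entry_eq (L : List Char) (nn k r : Nat) (hk : k < nn) (hr : r < nn)
    (hlen : nn * nn ≤ L.length) :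
    PySem.List.pyGetD L ((nn : Int) - 1 - (k : Int) + (nn : Int) * (r : Int)) ' ' =
      ((L.drop (r * nn)).take nn).getD (nn - 1 - k) ' ' := by
  have hq : ((nn * r : Nat) : Int) = (nn : Int) * (r : Int) := by push_cast; ring
  have hrow : r * nn + nn ≤ L.length := by
    have h1 : (r + 1) * nn ≤ nn * nn := Nat.mul_le_mul_right _ (by omega)
    have h2 : (r + 1) * nn = r * nn + nn := by ring
    omega
  rw [getD_take_drop L (r * nn) nn (nn - 1 - k) (by omega) hrow]
  rw [PySem.List.pyGetD_of_nonneg _ _ (by rw [← hq]; omega)]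
  congr 1
  rw [← hq]
  have hcomm : r * nn = nn * r := Nat.mul_comm r nn
  omega

theorem map_range_reverse {α : Type} (m : Nat) (f : Nat → α) :
    ((List.range m).map f).reverse = (List.range m).map (fun i => f (m - 1 - i)) := by
  rw [← List.map_reverse]
  conv_lhs => rw [List.range_eq_range', List.reverse_range']
  simp [List.map_map]

theorem solve_main (N : Int) (W : String) (hpre : Pre_solve N W) :
    solve N W = solve_alt N W := by
  by_cases hN1 : N = 1
  · simp [solve, solve_alt, hN1]
  · have hlen : N ≤ (W.toList.length : Int) := hpre.resolve_left hN1
    unfold solve solve_alt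
    rw [if_neg hN1, if_neg hN1]
    set L := W.toList with hL
    set n := (PySem.List.pyRange 2 101 1).foldl (fun n i => if i * i = N then i else n) 1 with hndef
    have hn : n = 1 ∨ (2 ≤ n ∧ n * n = N) := by
      apply foldsq
      · intro x hx; rw [PySem.List.mem_pyRange_one] at hx; omega
      · left; rfl
    simp only [PySem.List.foldl_append_singleton_eq_map, PySem.List.foldl_append_eq_flatMap,
      List.nil_append]
    congr 1
    rcases hn with h1 | ⟨hn2, hsq⟩
    · -- n = 1: A copies W[0..N-1]; B's rows are the N single-character slices
      rw [h1]
      have hfd : PySem.Int.floordiv N 1 = N := by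
        rw [PySem.Int.floordiv_eq_ediv_of_pos (by norm_num)]; exact Int.ediv_one N
      have houter : PySem.List.pyRange (1 - 1) (-1) (-1) = [0] := by decide
      rw [houter, hfd]
      simp only [List.flatMap_cons, List.flatMap_nil, List.append_nil, mul_one]
      by_cases hN0 : N ≤ 0
      · rw [PySem.List.pyRange_one_eq_nil hN0]
        rfl
      · rw [PySem.List.pyRange_one 0 N]
        simp only [zero_add, sub_zero, List.map_map, Function.comp_def]
        have hrows : (List.map (fun x => PySem.List.slice L (some ((x : Nat) : Int)) (some (((x : Nat) : Int) + 1))) (List.range N.toNat)) =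
            (List.range N.toNat).map (fun r => (L.drop r).take 1) := by
          apply List.map_congr_left; intro r _
          have h := PySem.List.slice_natCast_add L r 1
          simpa using h
        rw [hrows]
        rw [pyZip_uniform 1 _ (by simp; omega)
          (by intro r hr
              obtain ⟨r0, hr0, rfl⟩ := List.mem_map.mp hr
              have := List.mem_range.mp hr0
              simp only [List.length_take, List.length_drop]
              omega)]
        simp only [List.range_one, List.map_cons, List.map_nil, List.reverse_cons,
          List.reverse_nil, List.nil_append, List.flatten_cons, List.flatten_nil,
          List.append_nil, List.map_map, Function.comp_def]
        apply List.map_congr_left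
        intro r hr
        have hrN := List.mem_range.mp hr
        rw [PySem.List.pyGetD_natCast]
        rw [getD_take_drop L r 1 0 (by omega) (by omega), Nat.add_zero]
    · -- 2 ≤ n with n * n = N: B's transpose of the n row slices, columns reversed
      set nn := n.toNat with hnn
      have hcast : (nn : Int) = n := Int.toNat_of_nonneg (by omega)
      have h2n : 2 * n ≤ n * n := by nlinarith
      have hsqlen : nn * nn ≤ L.length := by
        have h := hlen
        rw [← hsq, ← hcast] at h
        exact_mod_cast h
      rw [PySem.List.pyRange_neg_one]
      have he : (n - 1 - -1) = n := by ring
      rw [he, ← hcast, Int.toNat_natCast, List.flatMap_map]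
      have hfd : PySem.Int.floordiv N n = n := by
        rw [← hsq, PySem.Int.floordiv_eq_ediv_of_pos (by omega)]
        exact Int.mul_ediv_cancel_left _ (by omega)
      have hfd' : PySem.Int.floordiv N (nn : Int) = (nn : Int) := by rw [hcast]; exact hfd
      rw [hfd', PySem.List.pyRange_one 0 ((nn : Int))]
      simp only [sub_zero, Int.toNat_natCast, zero_add, List.map_map, Function.comp_def]
      have hrows : (List.map (fun x => PySem.List.slice L (some (((x : Nat) : Int) * (nn : Int))) (some ((((x : Nat) : Int) + 1) * (nn : Int)))) (List.range nn)) =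
          (List.range nn).map (fun r => (L.drop (r * nn)).take nn) := by
        apply List.map_congr_left; intro r _
        have h := PySem.List.slice_natCast_add L (r * nn) nn
        have e1 : (((r * nn : Nat)) : Int) = (r : Int) * (nn : Int) := by push_cast; ring
        have e2 : ((r : Int) * (nn : Int) + (nn : Int)) = ((r : Int) + 1) * (nn : Int) := by ring
        rw [e1, e2] at h
        exact h
      rw [hrows]
      have hnn0 : nn ≠ 0 := by omega
      rw [pyZip_uniform nn _ (by simp [hnn0])
        (by intro r hr
            obtain ⟨r0, hr0, rfl⟩ := List.mem_map.mp hr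
            have hr0' := List.mem_range.mp hr0
            have h1 : (r0 + 1) * nn ≤ nn * nn := Nat.mul_le_mul_right _ (by omega)
            have h2 : (r0 + 1) * nn = r0 * nn + nn := by ring
            simp only [List.length_take, List.length_drop]
            omega)]
      simp only [List.map_map, Function.comp_def]
      rw [map_range_reverse]
      rw [List.flatMap_def]
      refine congrArg List.flatten ?_
      apply List.map_congr_left
      intro k hk
      have hkn := List.mem_range.mp hk
      have hnnpos : (0 : Int) < (nn : Int) := by exact_mod_cast Nat.pos_of_ne_zero hnn0
      rw [PySem.List.pyRange_of_pos _ _ hnnpos]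
      have hsq' : ((nn * nn : Nat) : Int) = N := by rw [← hsq, ← hcast]; push_cast; ring
      have hle' : nn ≤ nn * nn := Nat.le_mul_of_pos_left _ (Nat.pos_of_ne_zero hnn0)
      have hiN : ((nn : Int) - 1 - (k : Int)) < N := by rw [← hsq']; omega
      rw [if_pos hiN]
      have hcount : ((N - ((nn : Int) - 1 - (k : Int)) + (nn : Int) - 1) / (nn : Int)).toNat = nn := by
        have e : N - ((nn : Int) - 1 - (k : Int)) + (nn : Int) - 1 = (k : Int) + (nn : Int) * (nn : Int) := by
          rw [← hsq']; push_cast; ring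
        rw [e, Int.add_mul_ediv_left _ _ (by omega : ((nn : Int)) ≠ 0)]
        rw [Int.ediv_eq_zero_of_lt (by omega) (by exact_mod_cast hkn)]
        simp
      rw [hcount, List.map_map]
      apply List.map_congr_left
      intro r hr
      exact entry_eq L nn k r hkn (List.mem_range.mp hr) hsqlen

-- ===== VERDICT (by name: the statement is the Claim_ definition above) =====
theorem solve_spec : Claim_equal_solve := by
  intro N W _ hpre
  unfold Spec_solve
  exact solve_main N W hpre
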